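-- pv_equiv track=rewrite | github.com/vedant1711/Skitech_FarmFit_Backend | app/views/fertilizer_combination.py | categorize_fertilizers
-- ===== SOURCE A (Python) =====
-- def categorize_fertilizers(fertilizers):
--     npk_fertilizers = {}
--     np_fertilizers = {}
--     nk_fertilizers = {}
--     pk_fertilizers = {}
--     n_fertilizers = {}
--     p_fertilizers = {}
--     k_fertilizers = {}
--
--     for fert_name, content in fertilizers.items():
--         n, p, k = content
--         if n > 0 and p > 0 and k > 0:
--             npk_fertilizers[fert_name] = content
--         elif n > 0 and p > 0:
--             np_fertilizers[fert_name] = content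
--         elif n > 0 and k > 0:
--             nk_fertilizers[fert_name] = content
--         elif p > 0 and k > 0:
--             pk_fertilizers[fert_name] = content
--         elif n > 0:
--             n_fertilizers[fert_name] = content
--         elif p > 0:
--             p_fertilizers[fert_name] = content
--         elif k > 0:
--             k_fertilizers[fert_name] = content
--
--     return npk_fertilizers, np_fertilizers, nk_fertilizers, pk_fertilizers, n_fertilizers, p_fertilizers, k_fertilizers
-- ===== SOURCE B (Python) =====
-- def categorize_fertilizers(fertilizers):
--     # Seven independent filter passes: each category is the sub-dict of items
--     # whose exact positivity signature (n>0, p>0, k>0) matches. Order preserved.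
--     items = list(fertilizers.items())
--
--     def pick(wn, wp, wk):
--         return {name: c for name, c in items
--                 if (c[0] > 0) == wn and (c[1] > 0) == wp and (c[2] > 0) == wk}
--
--     return (pick(True, True, True), pick(True, True, False),
--             pick(True, False, True), pick(False, True, True),
--             pick(True, False, False), pick(False, True, False),
--             pick(False, False, True))
-- ===== Notes on version B (the rewrite author's own statement) =====
-- stated objective: alternative
-- what changed: Replaces A's single pass with a seven-way if/elif chain mutating seven dicts by seven independent filter passes (dict comprehensions), one per exact positivity signature (n>0,p>0,k>0); the all-non-positive signature is simply never selected.
import Mathlib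
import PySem

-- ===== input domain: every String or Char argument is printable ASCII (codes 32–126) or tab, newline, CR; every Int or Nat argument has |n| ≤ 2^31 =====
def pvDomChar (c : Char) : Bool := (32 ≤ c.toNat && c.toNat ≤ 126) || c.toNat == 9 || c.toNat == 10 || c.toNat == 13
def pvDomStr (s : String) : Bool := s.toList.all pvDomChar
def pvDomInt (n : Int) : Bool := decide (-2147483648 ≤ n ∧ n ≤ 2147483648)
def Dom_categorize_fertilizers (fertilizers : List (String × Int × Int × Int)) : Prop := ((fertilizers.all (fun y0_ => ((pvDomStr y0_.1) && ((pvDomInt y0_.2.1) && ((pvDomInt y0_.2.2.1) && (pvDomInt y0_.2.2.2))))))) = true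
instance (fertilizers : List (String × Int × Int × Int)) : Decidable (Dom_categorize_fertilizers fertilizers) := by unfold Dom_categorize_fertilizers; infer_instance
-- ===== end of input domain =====

-- B replaces A's single loop with a seven-way if/elif chain by seven independent
-- filter passes, one per exact positivity signature (objective: alternative).
-- The dict parameter is marshalled as an association list; both ports first
-- rebuild the Python dict (PySem.Dict.ofList) exactly as dict construction does.

-- ===== PORT A =====
-- abbreviation for the accumulator dicts
def FDict := PySem.Dict String (Int × Int × Int)

-- the body of A's for-loop: the if/elif chain, one elif per category
def stepA (s : FDict × FDict × FDict × FDict × FDict × FDict × FDict)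
    (x : String × Int × Int × Int) :
    FDict × FDict × FDict × FDict × FDict × FDict × FDict :=
  match s, x with
  | (npk, np, nk, pk, n_, p_, k_), (fert_name, n, p, k) =>
    if n > 0 ∧ p > 0 ∧ k > 0 then (npk.insert fert_name (n, p, k), np, nk, pk, n_, p_, k_)
    else if n > 0 ∧ p > 0 then (npk, np.insert fert_name (n, p, k), nk, pk, n_, p_, k_)
    else if n > 0 ∧ k > 0 then (npk, np, nk.insert fert_name (n, p, k), pk, n_, p_, k_)
    else if p > 0 ∧ k > 0 then (npk, np, nk, pk.insert fert_name (n, p, k), n_, p_, k_)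
    else if n > 0 then (npk, np, nk, pk, n_.insert fert_name (n, p, k), p_, k_)
    else if p > 0 then (npk, np, nk, pk, n_, p_.insert fert_name (n, p, k), k_)
    else if k > 0 then (npk, np, nk, pk, n_, p_, k_.insert fert_name (n, p, k))
    else (npk, np, nk, pk, n_, p_, k_)

def categorize_fertilizers (fertilizers : List (String × Int × Int × Int)) : (List (String × Int × Int × Int)) × (List (String × Int × Int × Int)) × (List (String × Int × Int × Int)) × (List (String × Int × Int × Int)) × (List (String × Int × Int × Int)) × (List (String × Int × Int × Int)) × (List (String × Int × Int × Int)) :=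
  let d := PySem.Dict.ofList fertilizers  -- the Python caller's dict built from the pairs
  match d.items.foldl stepA
      (PySem.Dict.empty, PySem.Dict.empty, PySem.Dict.empty, PySem.Dict.empty,
       PySem.Dict.empty, PySem.Dict.empty, PySem.Dict.empty) with
  | (npk, np, nk, pk, n_, p_, k_) =>
    (npk.items, np.items, nk.items, pk.items, n_.items, p_.items, k_.items)

-- ===== PORT B =====
-- Source B's filter predicate: (c[0]>0)==wn and (c[1]>0)==wp and (c[2]>0)==wk
def patB (wn wp wk : Bool) (x : String × Int × Int × Int) : Bool :=
  (decide (x.2.1 > 0) == wn) && (decide (x.2.2.1 > 0) == wp) && (decide (x.2.2.2 > 0) == wk)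

-- Source B's `pick`: a dict comprehension = filter the items, then insert each into a fresh dict
def pick (items : List (String × Int × Int × Int)) (wn wp wk : Bool) :
    List (String × Int × Int × Int) :=
  ((items.filter (patB wn wp wk)).foldl
    (fun (d : FDict) x => d.insert x.1 x.2) PySem.Dict.empty).items

def categorize_fertilizers_alt (fertilizers : List (String × Int × Int × Int)) : (List (String × Int × Int × Int)) × (List (String × Int × Int × Int)) × (List (String × Int × Int × Int)) × (List (String × Int × Int × Int)) × (List (String × Int × Int × Int)) × (List (String × Int × Int × Int)) × (List (String × Int × Int × Int)) :=
  let items := (PySem.Dict.ofList fertilizers).items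
  (pick items true true true, pick items true true false,
   pick items true false true, pick items false true true,
   pick items true false false, pick items false true false,
   pick items false false true)

-- ===== PRECONDITION & SPEC =====
-- DecidableEq of the 7-tuple result type, assembled explicitly; used by the Spec_ instance
def pvDecEq7 : DecidableEq ((List (String × Int × Int × Int)) × (List (String × Int × Int × Int)) × (List (String × Int × Int × Int)) × (List (String × Int × Int × Int)) × (List (String × Int × Int × Int)) × (List (String × Int × Int × Int)) × (List (String × Int × Int × Int))) :=
  @instDecidableEqProd _ _ inferInstance <| @instDecidableEqProd _ _ inferInstance <|
    @instDecidableEqProd _ _ inferInstance <| @instDecidableEqProd _ _ inferInstance <|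
      @instDecidableEqProd _ _ inferInstance <| @instDecidableEqProd _ _ inferInstance inferInstance

def Spec_categorize_fertilizers (fertilizers : List (String × Int × Int × Int)) (out : (List (String × Int × Int × Int)) × (List (String × Int × Int × Int)) × (List (String × Int × Int × Int)) × (List (String × Int × Int × Int)) × (List (String × Int × Int × Int)) × (List (String × Int × Int × Int)) × (List (String × Int × Int × Int))) : Prop := out = categorize_fertilizers_alt fertilizers
instance (fertilizers : List (String × Int × Int × Int)) (out : (List (String × Int × Int × Int)) × (List (String × Int × Int × Int)) × (List (String × Int × Int × Int)) × (List (String × Int × Int × Int)) × (List (String × Int × Int × Int)) × (List (String × Int × Int × Int)) × (List (String × Int × Int × Int))) : Decidable (Spec_categorize_fertilizers fertilizers out) := by unfold Spec_categorize_fertilizers; exact pvDecEq7 out (categorize_fertilizers_alt fertilizers)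

-- ===== CLAIM (what is proved, stated in full; the proofs are below) =====
def Claim_equal_categorize_fertilizers : Prop := ∀ (fertilizers : List (String × Int × Int × Int)), Dom_categorize_fertilizers fertilizers → Spec_categorize_fertilizers fertilizers (categorize_fertilizers fertilizers)

-- ===== LEMMAS AND PROOFS =====

-- conditional insert on signature (wn,wp,wk): the independent evolution of one category
def gStep (wn wp wk : Bool) (d : FDict) (x : String × Int × Int × Int) : FDict :=
  if patB wn wp wk x then d.insert x.1 x.2 else d

-- key invariant: A's seven accumulators each evolve independently as a
-- conditional-insert fold over the full list, selected by its exact signature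
lemma fold_key (l : List (String × Int × Int × Int))
    (d7 d6 d5 d3 d4 d2 d1 : FDict) :
    l.foldl stepA (d7, d6, d5, d3, d4, d2, d1) =
      (l.foldl (gStep true true true) d7, l.foldl (gStep true true false) d6,
       l.foldl (gStep true false true) d5, l.foldl (gStep false true true) d3,
       l.foldl (gStep true false false) d4, l.foldl (gStep false true false) d2,
       l.foldl (gStep false false true) d1) := by
  induction l generalizing d7 d6 d5 d3 d4 d2 d1 with
  | nil => rfl
  | cons x t ih =>
    obtain ⟨name, n, p, k⟩ := x
    by_cases hn : n > 0 <;> by_cases hp : p > 0 <;> by_cases hk : k > 0 <;>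
      simp only [List.foldl_cons, stepA, gStep, patB, hn, hp, hk, decide_true,
        decide_false, if_pos, if_neg, not_false_iff, true_and, false_and, and_true,
        and_false, if_true, if_false, Bool.true_and, Bool.false_and, Bool.and_true,
        Bool.and_false, Bool.true_beq, Bool.false_beq,
       ] <;>
      exact ih _ _ _ _ _ _ _

-- fold over a filter = conditional fold over the whole list (per category)
lemma pick_eq (l : List (String × Int × Int × Int)) (wn wp wk : Bool) :
    pick l wn wp wk = (l.foldl (gStep wn wp wk) PySem.Dict.empty).items := by
  simp only [pick, List.foldl_filter]
  rfl

-- ===== VERDICT (by name: the statement is the Claim_ definition above) =====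
theorem categorize_fertilizers_spec : Claim_equal_categorize_fertilizers := by
  intro fertilizers _
  show categorize_fertilizers fertilizers = categorize_fertilizers_alt fertilizers
  simp only [categorize_fertilizers, categorize_fertilizers_alt, fold_key, pick_eq]
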